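-- pv_equiv track=rewrite | github.com/sysid/pyo-select-points | max_number/helper.py | create_ok
-- ===== SOURCE A (Python) =====
-- from typing import Dict, Set
--
-- def create_ok(config: Dict) -> Set[tuple]:
--     points = config['points'].keys()
--     ok: Set = set()
--     for i in points:
--         for j in points:
--             if i < j:
--                 ok.add((i, j))
--     return ok
-- ===== SOURCE B (Python) =====
-- from typing import Dict, Set
--
-- def create_ok(config: Dict) -> Set[tuple]:
--     # Sort the keys once, then pair each key with every strictly later key:
--     # no i<j comparisons and only the ascending half of the cross product.
--     keys = sorted(config['points'].keys())
--     ok: Set = set()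
--     while keys:
--         i = keys.pop(0)
--         for j in keys:
--             ok.add((i, j))
--     return ok
-- ===== Notes on version B (the rewrite author's own statement) =====
-- stated objective: alternative
-- what changed: Instead of testing i<j over the full n×n cross product of keys, B sorts the keys once and pairs each key only with the strictly later keys, so the comparison guard disappears and only the ascending half of the pairs is ever generated.
import Mathlib
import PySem

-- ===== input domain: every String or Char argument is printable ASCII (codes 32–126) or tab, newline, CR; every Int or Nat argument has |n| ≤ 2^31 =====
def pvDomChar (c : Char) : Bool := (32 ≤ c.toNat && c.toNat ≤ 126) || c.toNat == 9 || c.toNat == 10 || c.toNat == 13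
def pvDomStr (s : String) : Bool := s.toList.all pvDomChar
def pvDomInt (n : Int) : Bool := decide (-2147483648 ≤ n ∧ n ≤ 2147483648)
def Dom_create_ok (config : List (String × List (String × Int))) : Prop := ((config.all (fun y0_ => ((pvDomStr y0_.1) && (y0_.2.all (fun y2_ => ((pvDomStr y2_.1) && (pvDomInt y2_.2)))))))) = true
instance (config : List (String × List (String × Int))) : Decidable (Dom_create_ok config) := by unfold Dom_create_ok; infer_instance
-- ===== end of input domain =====

-- B sorts the keys once and pairs each key with every strictly later key, removing A's
-- i<j guard and the descending half of the cross product (alternative, same asymptotics).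
-- Python returns a SET; its iteration order is not modelled, so both ports return the
-- set in canonical ascending (tuple-sorted) order — exact as a finite set.

-- ===== PORT A =====
def create_ok (config : List (String × List (String × Int))) : List (String × String) :=
  match (PySem.Dict.mk config).get? "points" with
  | none => []  -- config['points'] raises KeyError: excluded by Pre_
  | some pts =>
      -- points = config['points'].keys()  (the dict's distinct keys, first-occurrence order)
      let points := PySem.List.dedup (pts.map Prod.fst)
      let ok : PySem.Set (String × String) :=
        points.foldl (fun ok i =>
          points.foldl (fun ok j =>
            if i < j then PySem.Set.add ok (i, j) else ok) ok) PySem.Set.empty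
      -- return ok : a set; returned in canonical ascending order (set order is not modelled)
      PySem.List.sorted2 ok (fun p => p.1) (fun p => p.2) false

-- ===== PORT B =====
-- the 'while keys: i = keys.pop(0); for j in keys: ok.add((i, j))' loop of Source B
def goPairs : List String → PySem.Set (String × String) → PySem.Set (String × String)
  | [], ok => ok
  | i :: keys, ok => goPairs keys (keys.foldl (fun ok j => PySem.Set.add ok (i, j)) ok)

def create_ok_alt (config : List (String × List (String × Int))) : List (String × String) :=
  match (PySem.Dict.mk config).get? "points" with
  | none => []  -- KeyError, excluded by Pre_
  | some pts =>
      let keys := PySem.List.sorted (PySem.List.dedup (pts.map Prod.fst)) (fun x => x) false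
      goPairs keys PySem.Set.empty

-- ===== PRECONDITION & SPEC =====
-- A (and B) raise KeyError when config has no 'points' key; exactly those inputs are excluded.
def Pre_create_ok (config : List (String × List (String × Int))) : Prop :=
  ((PySem.Dict.mk config).get? "points").isSome = true
instance (config : List (String × List (String × Int))) : Decidable (Pre_create_ok config) := by
  unfold Pre_create_ok; infer_instance

def pvWitness_create_ok : (List (String × List (String × Int))) :=
  [("points", [("a", 1), ("b", 2), ("c", 3)])]

def Spec_create_ok (config : List (String × List (String × Int))) (out : List (String × String)) : Prop := out = create_ok_alt config
instance (config : List (String × List (String × Int))) (out : List (String × String)) : Decidable (Spec_create_ok config out) := by unfold Spec_create_ok; infer_instance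

-- ===== CLAIM (what is proved, stated in full; the proofs are below) =====
def Claim_equal_create_ok : Prop := ∀ (config : List (String × List (String × Int))), Dom_create_ok config → Pre_create_ok config → Spec_create_ok config (create_ok config)

-- ===== LEMMAS AND PROOFS =====

-- lexicographic tuple order on pairs of strings (Python's tuple comparison)
def lexLe (p q : String × String) : Prop := p.1 < q.1 ∨ (p.1 = q.1 ∧ p.2 ≤ q.2)
def lexLt (p q : String × String) : Prop := p.1 < q.1 ∨ (p.1 = q.1 ∧ p.2 < q.2)

-- the group of pairs A's outer iteration at key i contributes
def groupOf (points : List String) (i : String) : List (String × String) :=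
  (points.filter (fun j => decide (i < j))).map (fun j => (i, j))

-- ascending pairs of a list, head paired with the tail, recursively (B's value)
def lexPairs : List String → List (String × String)
  | [] => []
  | i :: rest => rest.map (fun j => (i, j)) ++ lexPairs rest

theorem lexLt_le {p q : String × String} (h : lexLt p q) : lexLe p q := by
  rcases h with h | ⟨h1, h2⟩
  · exact Or.inl h
  · exact Or.inr ⟨h1, le_of_lt h2⟩

theorem lexLt_ne {p q : String × String} (h : lexLt p q) : p ≠ q := by
  rintro rfl
  rcases h with h | ⟨_, h⟩ <;> exact lt_irrefl _ h

theorem lexLe_antisymm {p q : String × String} (h1 : lexLe p q) (h2 : lexLe q p) : p = q := by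
  rcases h1 with h1 | ⟨h1a, h1b⟩ <;> rcases h2 with h2 | ⟨h2a, h2b⟩
  · exact absurd h2 (lt_asymm h1)
  · exact absurd h1 (by rw [h2a]; exact lt_irrefl _)
  · exact absurd h2 (by rw [h1a]; exact lt_irrefl _)
  · exact Prod.ext h1a (le_antisymm h1b h2b)

theorem lexLe_trans {p q r : String × String} (h1 : lexLe p q) (h2 : lexLe q r) : lexLe p r := by
  rcases h1 with h1 | ⟨h1a, h1b⟩ <;> rcases h2 with h2 | ⟨h2a, h2b⟩
  · exact Or.inl (lt_trans h1 h2)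
  · exact Or.inl (h2a ▸ h1)
  · exact Or.inl (h1a ▸ h2)
  · exact Or.inr ⟨h1a.trans h2a, le_trans h1b h2b⟩

-- the comparator sorted2 uses, characterised
def bef (a b : String × String) : Bool :=
  decide (a.1 < b.1) || (!decide (b.1 < a.1) && decide (a.2 < b.2))

theorem bef_true_iff (a b : String × String) : bef a b = true ↔ lexLt a b := by
  unfold bef lexLt
  rcases lt_trichotomy a.1 b.1 with h | h | h
  · simp only [Bool.or_eq_true, decide_eq_true_eq]
    exact ⟨fun _ => Or.inl h, fun _ => Or.inl h⟩
  · have h1 : ¬ a.1 < b.1 := by rw [h]; exact lt_irrefl _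
    have h2 : ¬ b.1 < a.1 := by rw [h]; exact lt_irrefl _
    simp only [Bool.or_eq_true, Bool.and_eq_true, Bool.not_eq_true', decide_eq_true_eq,
      decide_eq_false_iff_not]
    constructor
    · rintro (h' | ⟨_, h'⟩)
      · exact absurd h' h1
      · exact Or.inr ⟨h, h'⟩
    · rintro (h' | ⟨_, h'⟩)
      · exact absurd h' h1
      · exact Or.inr ⟨h2, h'⟩
  · have h1 : ¬ a.1 < b.1 := lt_asymm h
    have h2 : a.1 ≠ b.1 := fun e => absurd (e ▸ h) (lt_irrefl _)
    simp only [Bool.or_eq_true, Bool.and_eq_true, Bool.not_eq_true', decide_eq_true_eq,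
      decide_eq_false_iff_not]
    constructor
    · rintro (h' | ⟨h', _⟩)
      · exact absurd h' h1
      · exact absurd h h'
    · rintro (h' | ⟨h', _⟩)
      · exact absurd h' h1
      · exact absurd h' h2

theorem bef_false_le {a b : String × String} (h : bef a b = false) : lexLe b a := by
  have hn : ¬ lexLt a b := by rw [← bef_true_iff]; simp [h]
  unfold lexLt at hn
  rcases lt_trichotomy a.1 b.1 with h1 | h1 | h1
  · exact absurd (Or.inl h1) hn
  · exact Or.inr ⟨h1.symm, le_of_not_gt (fun hb => hn (Or.inr ⟨h1, hb⟩))⟩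
  · exact Or.inl h1

theorem insertBy_perm (x : String × String) (acc : List (String × String)) :
    (PySem.List.insertBy bef x acc).Perm (x :: acc) := by
  induction acc with
  | nil => simp [PySem.List.insertBy]
  | cons y ys ih =>
      rw [PySem.List.insertBy]
      split
      · exact List.Perm.refl _
      · exact (List.Perm.cons y ih).trans (List.Perm.swap x y ys)

theorem insertBy_pairwise (x : String × String) (acc : List (String × String))
    (h : acc.Pairwise lexLe) : (PySem.List.insertBy bef x acc).Pairwise lexLe := by
  induction acc with
  | nil => simp [PySem.List.insertBy]
  | cons y ys ih =>
      rw [PySem.List.insertBy]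
      rcases List.pairwise_cons.mp h with ⟨hy, hys⟩
      split
      · rename_i hb
        have hxy : lexLe x y := lexLt_le ((bef_true_iff x y).mp hb)
        exact List.pairwise_cons.mpr ⟨by
          intro z hz
          rcases List.mem_cons.mp hz with rfl | hz
          · exact hxy
          · exact lexLe_trans hxy (hy z hz), h⟩
      · rename_i hb
        have hyx : lexLe y x := bef_false_le (by simpa using hb)
        refine List.pairwise_cons.mpr ⟨?_, ih hys⟩
        intro z hz
        have : z ∈ x :: ys := (insertBy_perm x ys).mem_iff.mp hz
        rcases List.mem_cons.mp this with rfl | hz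
        · exact hyx
        · exact hy z hz

theorem foldl_insertBy_perm (xs : List (String × String)) :
    ∀ acc, (xs.foldl (fun acc x => PySem.List.insertBy bef x acc) acc).Perm (xs ++ acc) := by
  induction xs with
  | nil => intro acc; simp
  | cons x xs ih =>
      intro acc
      have h1 := ih (PySem.List.insertBy bef x acc)
      have h2 : (xs ++ PySem.List.insertBy bef x acc).Perm (xs ++ (x :: acc)) :=
        List.Perm.append_left xs (insertBy_perm x acc)
      have h3 : (xs ++ (x :: acc)).Perm (x :: (xs ++ acc)) := List.perm_middle
      exact h1.trans (h2.trans h3)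

theorem foldl_insertBy_pairwise (xs : List (String × String)) :
    ∀ acc, acc.Pairwise lexLe →
      (xs.foldl (fun acc x => PySem.List.insertBy bef x acc) acc).Pairwise lexLe := by
  induction xs with
  | nil => intro acc h; exact h
  | cons x xs ih => intro acc h; exact ih _ (insertBy_pairwise x acc h)

-- uniqueness of ascending tuple order: sorted2 of any rearrangement of ys is ys
theorem sorted2_lex_eq (xs ys : List (String × String))
    (hperm : ys.Perm xs) (hys : ys.Pairwise lexLt) :
    PySem.List.sorted2 xs (fun p => p.1) (fun p => p.2) false = ys := by
  have hdef : PySem.List.sorted2 xs (fun p => p.1) (fun p => p.2) false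
      = xs.foldl (fun acc x => PySem.List.insertBy bef x acc) [] := rfl
  rw [hdef]
  refine List.Perm.eq_of_pairwise
    (fun a b _ _ h1 h2 => lexLe_antisymm h1 h2)
    (foldl_insertBy_pairwise xs [] List.Pairwise.nil)
    (hys.imp lexLt_le) ?_
  have hp := foldl_insertBy_perm xs []
  rw [List.append_nil] at hp
  exact hp.trans hperm.symm

-- A's inner loop is a set-update with the group of key i
theorem A_inner (points : List String) (i : String) (acc : PySem.Set (String × String)) :
    points.foldl (fun ok j => if i < j then PySem.Set.add ok (i, j) else ok) acc
      = PySem.Set.update acc (groupOf points i) := by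
  rw [groupOf, PySem.Set.update_map_eq_foldl_add, List.foldl_filter]
  simp only [decide_eq_true_eq]

theorem nodup_groupOf {points : List String} (h : points.Nodup) (i : String) :
    (groupOf points i).Nodup := by
  exact (h.filter _).map (fun a b hab => by simpa using hab)

theorem mem_groupOf {points : List String} {i : String} {p : String × String} :
    p ∈ groupOf points i ↔ p.1 = i ∧ p.2 ∈ points ∧ i < p.2 := by
  rcases p with ⟨a, b⟩
  unfold groupOf
  constructor
  · intro h
    rcases List.mem_map.mp h with ⟨j, hj, e⟩
    rcases List.mem_filter.mp hj with ⟨hjm, hij⟩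
    cases e
    exact ⟨rfl, hjm, by simpa using hij⟩
  · rintro ⟨rfl, hb, hib⟩
    exact List.mem_map.mpr ⟨b, List.mem_filter.mpr ⟨hb, by simpa using hib⟩, rfl⟩

theorem A_outer (points : List String) (hnp : points.Nodup) :
    ∀ (ps : List String) (acc : PySem.Set (String × String)), ps.Nodup →
      (∀ i ∈ ps, ∀ p ∈ acc, p.1 ≠ i) →
      ps.foldl (fun ok i => PySem.Set.update ok (groupOf points i)) acc
        = acc ++ ps.flatMap (groupOf points) := by
  intro ps
  induction ps with
  | nil => intro acc _ _; simp
  | cons i rest ih =>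
      intro acc hnd hacc
      have hstep : PySem.Set.update acc (groupOf points i) = acc ++ groupOf points i := by
        apply PySem.Set.update_eq_append_of_disjoint _ _ (nodup_groupOf hnp i)
        intro p hp hpacc
        exact hacc i (by simp) p hpacc (mem_groupOf.mp hp).1
      rw [List.foldl_cons, hstep, ih _ (List.nodup_cons.mp hnd).2]
      · simp
      · intro i' hi' p hp
        rcases List.mem_append.mp hp with hp | hp
        · exact hacc i' (by simp [hi']) p hp
        · have e1 := (mem_groupOf.mp hp).1
          exact fun e => (List.nodup_cons.mp hnd).1 ((e1.symm.trans e) ▸ hi')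

theorem B_go (ks : List String) : ∀ acc : PySem.Set (String × String),
    ks.Nodup → (∀ i ∈ ks, ∀ p ∈ acc, p.1 ≠ i) →
    goPairs ks acc = acc ++ lexPairs ks := by
  induction ks with
  | nil => intro acc _ _; simp [goPairs, lexPairs]
  | cons i rest ih =>
      intro acc hnd hacc
      rw [goPairs]
      have hstep : rest.foldl (fun ok j => PySem.Set.add ok (i, j)) acc
          = acc ++ rest.map (fun j => (i, j)) := by
        rw [← PySem.Set.update_map_eq_foldl_add]
        apply PySem.Set.update_eq_append_of_disjoint
        · exact (List.nodup_cons.mp hnd).2.map (fun a b hab => by simpa using hab)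
        · intro p hp hpacc
          rcases List.mem_map.mp hp with ⟨j, _, rfl⟩
          exact hacc i (by simp) _ hpacc rfl
      rw [hstep, ih _ (List.nodup_cons.mp hnd).2]
      · simp [lexPairs]
      · intro i' hi' p hp
        rcases List.mem_append.mp hp with hp | hp
        · exact hacc i' (by simp [hi']) p hp
        · rcases List.mem_map.mp hp with ⟨j, _, rfl⟩
          intro e
          have e' : i = i' := e
          exact (List.nodup_cons.mp hnd).1 (e' ▸ hi')

theorem mem_flatMap_group {points : List String} {p : String × String} :
    p ∈ points.flatMap (groupOf points) ↔ p.1 ∈ points ∧ p.2 ∈ points ∧ p.1 < p.2 := by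
  rw [List.mem_flatMap]
  constructor
  · rintro ⟨i, hi, hp⟩
    rcases mem_groupOf.mp hp with ⟨h1, h2, h3⟩
    exact ⟨h1 ▸ hi, h2, h1 ▸ h3⟩
  · rintro ⟨h1, h2, h3⟩
    exact ⟨p.1, h1, mem_groupOf.mpr ⟨rfl, h2, h3⟩⟩

theorem nodup_flatMap_group (points : List String) (hnp : points.Nodup) :
    ∀ ps : List String, ps.Nodup → (ps.flatMap (groupOf points)).Nodup := by
  intro ps
  induction ps with
  | nil => intro _; simp
  | cons i rest ih =>
      intro hnd
      rw [List.flatMap_cons]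
      apply List.Nodup.append (nodup_groupOf hnp i) (ih (List.nodup_cons.mp hnd).2)
      intro p hp hp'
      rcases List.mem_flatMap.mp hp' with ⟨i', hi', hpi'⟩
      have e1 := (mem_groupOf.mp hp).1
      have e2 := (mem_groupOf.mp hpi').1
      exact (List.nodup_cons.mp hnd).1 (e1 ▸ e2 ▸ hi')

theorem fst_snd_mem_lexPairs {ks : List String} {p : String × String} (h : p ∈ lexPairs ks) :
    p.1 ∈ ks ∧ p.2 ∈ ks := by
  induction ks with
  | nil => simp [lexPairs] at h
  | cons i rest ih =>
      rw [lexPairs] at h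
      rcases List.mem_append.mp h with h | h
      · rcases List.mem_map.mp h with ⟨j, hj, rfl⟩
        exact ⟨by simp, by simp [hj]⟩
      · exact ⟨List.mem_cons_of_mem _ (ih h).1, List.mem_cons_of_mem _ (ih h).2⟩

theorem mem_lexPairs {ks : List String} (hpw : ks.Pairwise (· < ·)) {p : String × String} :
    p ∈ lexPairs ks ↔ p.1 ∈ ks ∧ p.2 ∈ ks ∧ p.1 < p.2 := by
  induction ks with
  | nil => simp [lexPairs]
  | cons i rest ih =>
      rcases List.pairwise_cons.mp hpw with ⟨hi, hrest⟩
      rw [lexPairs]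
      constructor
      · intro h
        rcases List.mem_append.mp h with h | h
        · rcases List.mem_map.mp h with ⟨j, hj, rfl⟩
          exact ⟨by simp, by simp [hj], hi j hj⟩
        · rcases (ih hrest).mp h with ⟨h1, h2, h3⟩
          exact ⟨List.mem_cons_of_mem _ h1, List.mem_cons_of_mem _ h2, h3⟩
      · rintro ⟨h1, h2, h3⟩
        rcases List.mem_cons.mp h1 with e1 | h1
        · rcases List.mem_cons.mp h2 with e2 | h2
          · exact absurd (e1 ▸ e2 ▸ h3) (lt_irrefl _)
          · apply List.mem_append_left
            exact List.mem_map.mpr ⟨p.2, h2, by rw [← e1]⟩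
        · rcases List.mem_cons.mp h2 with e2 | h2
          · exact absurd h3 (not_lt_of_gt (e2 ▸ hi _ h1))
          · exact List.mem_append_right _ ((ih hrest).mpr ⟨h1, h2, h3⟩)

theorem pairwise_lexPairs {ks : List String} (hpw : ks.Pairwise (· < ·)) :
    (lexPairs ks).Pairwise lexLt := by
  induction ks with
  | nil => simp [lexPairs]
  | cons i rest ih =>
      rcases List.pairwise_cons.mp hpw with ⟨hi, hrest⟩
      rw [lexPairs]
      refine List.pairwise_append.mpr ⟨?_, ih hrest, ?_⟩
      · exact (List.pairwise_map).mpr (hrest.imp (fun h => Or.inr ⟨rfl, h⟩))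
      · intro p hp q hq
        rcases List.mem_map.mp hp with ⟨j, _, rfl⟩
        exact Or.inl (hi _ (fst_snd_mem_lexPairs hq).1)

-- ===== VERDICT (by name: the statement is the Claim_ definition above) =====
theorem create_ok_spec : Claim_equal_create_ok := by
  intro config _ hpre
  unfold Spec_create_ok
  unfold Pre_create_ok at hpre
  obtain ⟨pts, h⟩ := Option.isSome_iff_exists.mp hpre
  simp only [create_ok, create_ok_alt, h]
  have hnp : (PySem.List.dedup (pts.map Prod.fst)).Nodup := PySem.List.nodup_dedup _
  set points := PySem.List.dedup (pts.map Prod.fst) with hpoints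
  set ks := PySem.List.sorted points (fun x => x) false with hks
  have hkperm : ks.Perm points := PySem.List.sorted_perm _ _ _
  have hknd : ks.Nodup := hkperm.nodup_iff.mpr hnp
  have hkpw : ks.Pairwise (· < ·) := by
    rw [hks, hpoints, PySem.List.dedup_eq_ofList]
    exact PySem.List.sorted_ofList_pairwise_lt _
  have hA : points.foldl (fun ok i => points.foldl
        (fun ok j => if i < j then PySem.Set.add ok (i, j) else ok) ok) PySem.Set.empty
      = points.flatMap (groupOf points) := by
    have hfn : (fun (ok : PySem.Set (String × String)) i => points.foldl
          (fun ok j => if i < j then PySem.Set.add ok (i, j) else ok) ok)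
        = fun ok i => PySem.Set.update ok (groupOf points i) := by
      funext ok i; exact A_inner points i ok
    rw [hfn, A_outer points hnp points PySem.Set.empty hnp
      (by intro i _ p hp; simp [PySem.Set.empty] at hp)]
    simp
  have hB : goPairs ks PySem.Set.empty = lexPairs ks := by
    rw [B_go ks PySem.Set.empty hknd (by intro i _ p hp; simp [PySem.Set.empty] at hp)]
    simp
  rw [hA, hB]
  apply sorted2_lex_eq
  · rw [List.perm_ext_iff_of_nodup
      ((pairwise_lexPairs hkpw).imp (fun h => lexLt_ne h))
      (nodup_flatMap_group points hnp points hnp)]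
    intro p
    rw [mem_lexPairs hkpw, mem_flatMap_group]
    simp [hkperm.mem_iff]
  · exact pairwise_lexPairs hkpw
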